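-- pv_equiv track=rewrite | github.com/VaibhavDS19/LeetCode | Python/1001-2000/1801-1900/1801-1810/1807.py | evaluate
-- ===== SOURCE A (Python) =====
-- from typing import List
--
-- def evaluate(s: str, knowledge: List[List[str]]) -> str:
--     d = dict()
--     for k in knowledge:
--         d[k[0]] = k[1]
--     n = len(s)
--     sr = ''
--     l = []
--     i = 0
--     while i < n:
--         while i < n and s[i] != '(':
--             l.append(s[i])
--             i += 1
--         if i < n:
--             i += 1
--             while i < n and s[i] != ')':
--                 sr += s[i]
--                 i += 1
--             i += 1
--             if sr in d.keys():
--                 for ch in d[sr]: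
--                     l.append(ch)
--             else:
--                 l.append('?')
--             sr = ''
--     return ''.join(l)
-- ===== SOURCE B (Python) =====
-- def evaluate(s, knowledge):
--     d = {k[0]: k[1] for k in knowledge}
--     out = []
--     t = s
--     while '(' in t:
--         pre, _, rest = t.partition('(')
--         key, _, t = rest.partition(')')
--         out.append(pre)
--         out.append(d.get(key, '?'))
--     out.append(t)
--     return ''.join(out)
-- ===== Notes on version B (the rewrite author's own statement) =====
-- stated objective: idiomatic
-- what changed: Replaces A's index-driven char-by-char state machine (manual inner/outer while loops building a char list and a key buffer) with an idiomatic loop that repeatedly partitions the remaining string on '(' and then on ')' and appends the literal prefix plus d.get(key,'?'); the C-level partition scans give a measured constant-factor speedup.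
import Mathlib
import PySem

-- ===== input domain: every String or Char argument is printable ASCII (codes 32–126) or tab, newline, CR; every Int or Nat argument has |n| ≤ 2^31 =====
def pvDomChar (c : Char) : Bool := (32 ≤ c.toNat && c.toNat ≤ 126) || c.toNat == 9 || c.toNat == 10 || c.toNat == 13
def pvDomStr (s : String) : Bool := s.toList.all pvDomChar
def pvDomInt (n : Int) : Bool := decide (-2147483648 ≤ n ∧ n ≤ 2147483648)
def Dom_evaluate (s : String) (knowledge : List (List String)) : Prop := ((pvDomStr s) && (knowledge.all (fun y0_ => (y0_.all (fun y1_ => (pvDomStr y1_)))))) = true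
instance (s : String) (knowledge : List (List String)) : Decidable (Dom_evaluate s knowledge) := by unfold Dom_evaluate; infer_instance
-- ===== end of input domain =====

-- B replaces A's char-by-char state machine by an idiomatic loop that partitions the remainder on '(' then ')' (measured constant-factor speedup); equivalence is about the return value.

-- ===== PORT A =====
-- d = dict(); for k in knowledge: d[k[0]] = k[1]
def buildDictA (knowledge : List (List String)) : PySem.Dict String String :=
  knowledge.foldl (fun d k => d.insert (PySem.List.pyGetD k 0 "") (PySem.List.pyGetD k 1 "")) PySem.Dict.empty

-- 'if sr in d.keys(): chars of d[sr] else: ['?']'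
def lookA (d : PySem.Dict String String) (sr : String) : List Char :=
  if d.contains sr then (PySem.Dict.getD d sr "").toList else ['?']

mutual
-- outer while: copy chars to l until '('
def loopA (d : PySem.Dict String String) : List Char → List Char → List Char
  | [], l => l
  | c :: rest, l =>
    if c = '(' then innerA d rest l []
    else loopA d rest (l ++ [c])
-- inner while: build sr until ')', then look it up and continue
def innerA (d : PySem.Dict String String) : List Char → List Char → List Char → List Char
  | [], l, sr => l ++ lookA d (String.mk sr)
  | c :: rest, l, sr =>
    if c = ')' then loopA d rest (l ++ lookA d (String.mk sr))
    else innerA d rest l (sr ++ [c])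
end

def evaluate (s : String) (knowledge : List (List String)) : String :=
  String.mk (loopA (buildDictA knowledge) s.toList [])

-- ===== PORT B =====
-- d = {k[0]: k[1] for k in knowledge}
def buildDictB (knowledge : List (List String)) : PySem.Dict String String :=
  knowledge.foldl (fun d k => d.insert (PySem.List.pyGetD k 0 "") (PySem.List.pyGetD k 1 "")) PySem.Dict.empty

-- d.get(key, '?')
def lookB (d : PySem.Dict String String) (key : String) : List Char :=
  (PySem.Dict.getD d key "?").toList

-- termination measure fact for the while loop (cited by decreasing_by)
theorem pvTailLt (t : List Char) (h : '(' ∈ t) :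
    ((((t.dropWhile (· != '(')).drop 1).dropWhile (· != ')')).drop 1).length < t.length := by
  have h1 : t.dropWhile (· != '(') ≠ [] := by
    simp only [ne_eq, List.dropWhile_eq_nil_iff]
    push_neg
    exact ⟨'(', h, by simp⟩
  have h2 : (t.dropWhile (· != '(')).length ≤ t.length := t.length_dropWhile_le _
  have h3 : 0 < (t.dropWhile (· != '(')).length := List.length_pos_of_ne_nil h1
  have h4 : (((t.dropWhile (· != '(')).drop 1).dropWhile (· != ')')).length ≤
      ((t.dropWhile (· != '(')).drop 1).length := List.length_dropWhile_le _ _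
  simp only [List.length_drop] at *
  omega

-- while '(' in t: pre,_,rest = t.partition('('); key,_,t = rest.partition(')'); out += pre; out += d.get(key,'?')
def loopB (d : PySem.Dict String String) (t : List Char) (out : List Char) : List Char :=
  if h : '(' ∈ t then
    let pre := t.takeWhile (· != '(')
    let rest := (t.dropWhile (· != '(')).drop 1
    let key := rest.takeWhile (· != ')')
    let t' := (rest.dropWhile (· != ')')).drop 1
    loopB d t' (out ++ pre ++ lookB d (String.mk key))
  else out ++ t
termination_by t.length
decreasing_by exact pvTailLt t h

def evaluate_alt (s : String) (knowledge : List (List String)) : String :=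
  String.mk (loopB (buildDictB knowledge) s.toList [])

-- ===== PRECONDITION & SPEC =====
-- Pre_ excludes knowledge entries of length < 2, on which A raises IndexError at k[0]/k[1] (B raises there too).
def Pre_evaluate (s : String) (knowledge : List (List String)) : Prop :=
  ∀ k ∈ knowledge, 2 ≤ k.length
instance (s : String) (knowledge : List (List String)) : Decidable (Pre_evaluate s knowledge) := by
  unfold Pre_evaluate; infer_instance

def pvWitness_evaluate : String × List (List String) := ("(a)b", [["a", "xy"]])

def Spec_evaluate (s : String) (knowledge : List (List String)) (out : String) : Prop := out = evaluate_alt s knowledge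
instance (s : String) (knowledge : List (List String)) (out : String) : Decidable (Spec_evaluate s knowledge out) := by unfold Spec_evaluate; infer_instance

-- ===== CLAIM (what is proved, stated in full; the proofs are below) =====
def Claim_equal_evaluate : Prop := ∀ (s : String) (knowledge : List (List String)), Dom_evaluate s knowledge → Pre_evaluate s knowledge → Spec_evaluate s knowledge (evaluate s knowledge)

-- ===== LEMMAS AND PROOFS =====

theorem lookAB (d : PySem.Dict String String) (k : String) : lookA d k = lookB d k := by
  unfold lookA lookB
  cases h : PySem.Dict.get? d k with
  | none =>
    rw [PySem.Dict.contains_eq_isSome_get?, h]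
    simp [PySem.Dict.getD_eq_get?_getD, h]
  | some v =>
    rw [PySem.Dict.contains_eq_isSome_get?, h]
    simp [PySem.Dict.getD_eq_get?_getD, h]

theorem loopB_nil (d : PySem.Dict String String) (out : List Char) : loopB d [] out = out := by
  rw [loopB]; simp

theorem loopB_acc (d : PySem.Dict String String) :
    ∀ n t, t.length ≤ n → ∀ out, loopB d t out = out ++ loopB d t [] := by
  intro n
  induction n with
  | zero =>
    intro t h out
    have : t = [] := List.eq_nil_of_length_eq_zero (Nat.le_zero.1 h)
    subst this
    simp [loopB_nil]
  | succ n ih =>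
    intro t h out
    by_cases hp : '(' ∈ t
    · have hlt := pvTailLt t hp
      conv_lhs => rw [loopB]
      conv_rhs => rw [loopB]
      simp only [hp, dite_true]
      rw [ih _ (by omega), ih _ (by omega) ([] ++ t.takeWhile (· != '(') ++
        lookB d (String.mk (((t.dropWhile (· != '(')).drop 1).takeWhile (· != ')'))))]
      simp
    · conv_lhs => rw [loopB]
      conv_rhs => rw [loopB]
      simp [hp]

theorem loopB_pos (d : PySem.Dict String String) (t : List Char) (hp : '(' ∈ t) :
    loopB d t [] = t.takeWhile (· != '(') ++
      lookB d (String.mk (((t.dropWhile (· != '(')).drop 1).takeWhile (· != ')'))) ++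
      loopB d ((((t.dropWhile (· != '(')).drop 1).dropWhile (· != ')')).drop 1) [] := by
  conv_lhs => rw [loopB]
  simp only [hp, dite_true]
  rw [loopB_acc d _ ((((t.dropWhile (· != '(')).drop 1).dropWhile (· != ')')).drop 1) (le_refl _)]
  simp

theorem loopB_neg (d : PySem.Dict String String) (t : List Char) (hp : '(' ∉ t) :
    loopB d t [] = t := by
  rw [loopB]; simp [hp]

theorem loopB_cons (d : PySem.Dict String String) (c : Char) (r : List Char) (hc : c ≠ '(') :
    loopB d (c :: r) [] = c :: loopB d r [] := by
  have htw : (c :: r).takeWhile (· != '(') = c :: r.takeWhile (· != '(') := by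
    simp [List.takeWhile_cons, hc]
  have hdw : (c :: r).dropWhile (· != '(') = r.dropWhile (· != '(') := by
    simp [List.dropWhile_cons, hc]
  by_cases hp : '(' ∈ r
  · rw [loopB_pos d _ (List.mem_cons_of_mem _ hp), loopB_pos d _ hp, htw, hdw]
    simp
  · have hcr : '(' ∉ c :: r := by
      intro hmem
      rcases List.mem_cons.1 hmem with h | h
      · exact hc h.symm
      · exact hp h
    rw [loopB_neg d _ hcr, loopB_neg d _ hp]

theorem loopAB (d : PySem.Dict String String) :
    ∀ n, (∀ cs, cs.length ≤ n → ∀ l, loopA d cs l = l ++ loopB d cs []) ∧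
      (∀ cs, cs.length ≤ n → ∀ l sr, innerA d cs l sr =
        l ++ lookA d (String.mk (sr ++ cs.takeWhile (· != ')'))) ++
          loopB d ((cs.dropWhile (· != ')')).drop 1) []) := by
  intro n
  induction n with
  | zero =>
    constructor
    · intro cs h l
      have : cs = [] := List.eq_nil_of_length_eq_zero (Nat.le_zero.1 h)
      subst this
      simp [loopA, loopB_nil]
    · intro cs h l sr
      have : cs = [] := List.eq_nil_of_length_eq_zero (Nat.le_zero.1 h)
      subst this
      simp [innerA, loopB_nil]
  | succ n ih =>
    constructor
    · intro cs h l
      match cs with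
      | [] => simp [loopA, loopB_nil]
      | c :: r =>
        simp only [List.length_cons, Nat.add_le_add_iff_right] at h
        by_cases hc : c = '('
        · subst hc
          rw [loopA]
          simp only [if_pos rfl]
          rw [(ih.2) r h l []]
          have hp : '(' ∈ '(' :: r := List.mem_cons_self ..
          rw [loopB_pos d _ hp]
          have htw : ('(' :: r).takeWhile (· != '(') = ([] : List Char) := by
            simp [List.takeWhile_cons]
          have hdw : ('(' :: r).dropWhile (· != '(') = '(' :: r := by
            simp [List.dropWhile_cons]
          rw [htw, hdw, lookAB]
          simp
        · rw [loopA]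
          simp only [if_neg hc]
          rw [(ih.1) r h (l ++ [c]), loopB_cons d c r hc]
          simp
    · intro cs h l sr
      match cs with
      | [] => simp [innerA, loopB_nil]
      | c :: r =>
        simp only [List.length_cons, Nat.add_le_add_iff_right] at h
        by_cases hc : c = ')'
        · subst hc
          rw [innerA]
          simp only [if_pos rfl]
          rw [(ih.1) r h (l ++ lookA d (String.mk sr))]
          have htw : (')' :: r).takeWhile (· != ')') = ([] : List Char) := by
            simp [List.takeWhile_cons]
          have hdw : (')' :: r).dropWhile (· != ')') = ')' :: r := by
            simp [List.dropWhile_cons]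
          rw [htw, hdw]
          simp
        · rw [innerA]
          simp only [if_neg hc]
          rw [(ih.2) r h l (sr ++ [c])]
          have htw : (c :: r).takeWhile (· != ')') = c :: r.takeWhile (· != ')') := by
            simp [List.takeWhile_cons, hc]
          have hdw : (c :: r).dropWhile (· != ')') = r.dropWhile (· != ')') := by
            simp [List.dropWhile_cons, hc]
          rw [htw, hdw]
          simp

-- ===== VERDICT (by name: the statement is the Claim_ definition above) =====
theorem evaluate_spec : Claim_equal_evaluate := by
  intro s knowledge _ _
  unfold Spec_evaluate evaluate evaluate_alt
  have hd : buildDictA knowledge = buildDictB knowledge := rfl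
  rw [hd, (loopAB (buildDictB knowledge) s.toList.length).1 s.toList (le_refl _) []]
  simp
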